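-- pv_equiv track=rewrite | github.com/t3dy/Battletoads | scripts/trace_to_midi.py | noise_timer_to_index
-- ===== SOURCE A (Python) =====
-- NOISE_PERIOD_TABLE = [4, 8, 16, 32, 64, 96, 128, 160, 202, 254, 380, 508, 762, 1016, 2034, 4068]
--
-- def noise_timer_to_index(timer_val):
--     """Reverse-map a decoded noise timer value to the 4-bit register index."""
--     best_idx = 0
--     best_dist = abs(timer_val - NOISE_PERIOD_TABLE[0])
--     for i, t in enumerate(NOISE_PERIOD_TABLE):
--         d = abs(timer_val - t)
--         if d < best_dist:
--             best_dist = d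
--             best_idx = i
--     return best_idx
-- ===== SOURCE B (Python) =====
-- from bisect import bisect_left
--
-- NOISE_PERIOD_TABLE = [4, 8, 16, 32, 64, 96, 128, 160, 202, 254, 380, 508, 762, 1016, 2034, 4068]
--
-- # Midpoints between consecutive table entries; timer values at or below a
-- # midpoint map to the lower index (matching the first-minimum tie-break).
-- _MIDPOINTS = [(a + b) // 2 for a, b in zip(NOISE_PERIOD_TABLE, NOISE_PERIOD_TABLE[1:])]
--
-- def noise_timer_to_index(timer_val):
--     """Reverse-map a decoded noise timer value to the 4-bit register index."""
--     return bisect_left(_MIDPOINTS, timer_val)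
-- ===== Notes on version B (the rewrite author's own statement) =====
-- stated objective: idiomatic
-- what changed: Replaces the linear argmin scan over the period table with bisect_left on a precomputed list of consecutive-entry midpoints (ties at a midpoint fall to the lower index, matching A's strict-< tie-break).
import Mathlib
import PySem

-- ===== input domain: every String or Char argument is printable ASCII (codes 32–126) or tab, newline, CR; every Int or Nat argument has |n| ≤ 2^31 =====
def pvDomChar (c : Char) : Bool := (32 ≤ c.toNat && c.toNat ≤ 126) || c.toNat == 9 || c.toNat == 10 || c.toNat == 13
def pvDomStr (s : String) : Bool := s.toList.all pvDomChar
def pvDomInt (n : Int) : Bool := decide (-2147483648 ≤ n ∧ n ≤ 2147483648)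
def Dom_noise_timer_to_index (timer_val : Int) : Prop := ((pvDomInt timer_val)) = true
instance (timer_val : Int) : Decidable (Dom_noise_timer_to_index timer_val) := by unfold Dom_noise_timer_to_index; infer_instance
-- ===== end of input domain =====

-- B replaces A's linear nearest-entry scan by a bisect_left over the precomputed
-- consecutive-midpoints table (idiomatic, O(log n) instead of O(n)).

-- ===== PORT A =====
def noisePeriodTable : List Int := [4, 8, 16, 32, 64, 96, 128, 160, 202, 254, 380, 508, 762, 1016, 2034, 4068]

-- the 'for i, t in enumerate(...)' loop with accumulators best_idx, best_dist
def ntiGo (timer_val : Int) : List (Int × Int) → Int → Int → Int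
  | [], best_idx, _ => best_idx
  | (i, t) :: rest, best_idx, best_dist =>
      let d : Int := ((timer_val - t).natAbs : Int)   -- abs(timer_val - t)
      if d < best_dist then ntiGo timer_val rest i d
      else ntiGo timer_val rest best_idx best_dist

def noise_timer_to_index (timer_val : Int) : Int :=
  -- best_dist = abs(timer_val - NOISE_PERIOD_TABLE[0]); the table is nonempty so [0] returns
  let best_dist : Int := ((timer_val - ((PySem.List.pyGet? noisePeriodTable 0).getD 0)).natAbs : Int)
  ntiGo timer_val (PySem.List.enumerate noisePeriodTable 0) 0 best_dist

-- ===== PORT B =====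
-- midpoints of consecutive table entries: [(a+b)//2 for a,b in zip(T, T[1:])]
def noiseMidpoints : List Int :=
  (noisePeriodTable.zip (PySem.List.slice noisePeriodTable (some 1) none)).map
    (fun p => PySem.Int.floordiv (p.1 + p.2) 2)

-- hand port of bisect.bisect_left (exact: indices stay in range, so getD 0 never fires)
def bisectLeft (a : List Int) (x : Int) (lo hi : Nat) : Nat :=
  if _h : lo < hi then
    let mid := (lo + hi) / 2
    if ((PySem.List.pyGet? a (mid : Int)).getD 0) < x then bisectLeft a x (mid + 1) hi
    else bisectLeft a x lo mid
  else lo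
termination_by hi - lo
decreasing_by all_goals omega

def noise_timer_to_index_alt (timer_val : Int) : Int :=
  (bisectLeft noiseMidpoints timer_val 0 noiseMidpoints.length : Int)

-- ===== PRECONDITION & SPEC =====
def Spec_noise_timer_to_index (timer_val : Int) (out : Int) : Prop := out = noise_timer_to_index_alt timer_val
instance (timer_val : Int) (out : Int) : Decidable (Spec_noise_timer_to_index timer_val out) := by unfold Spec_noise_timer_to_index; infer_instance

-- ===== CLAIM (what is proved, stated in full; the proofs are below) =====
def Claim_equal_noise_timer_to_index : Prop := ∀ (timer_val : Int), Dom_noise_timer_to_index timer_val → Spec_noise_timer_to_index timer_val (noise_timer_to_index timer_val)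

-- ===== LEMMAS AND PROOFS =====

theorem ntiGo_no_improve (tv : Int) (l : List (Int × Int)) (bi bd : Int)
    (h : ∀ p ∈ l, ¬(((tv - p.2).natAbs : Int) < bd)) : ntiGo tv l bi bd = bi := by
  induction l generalizing bi bd with
  | nil => rfl
  | cons p rest ih =>
      obtain ⟨i, x⟩ := p
      rw [ntiGo.eq_2]
      rw [if_neg (h (i, x) (List.mem_cons_self))]
      exact ih bi bd (fun q hq => h q (List.mem_cons_of_mem _ hq))

set_option maxRecDepth 4000 in
theorem bEval (t : Int) : noise_timer_to_index_alt t =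
    (bisectLeft [6,12,24,48,80,112,144,181,228,317,444,635,889,1525,3051] t 0 15 : Int) := by
  have hm : noiseMidpoints = [6,12,24,48,80,112,144,181,228,317,444,635,889,1525,3051] := by decide
  simp [noise_timer_to_index_alt, hm]

-- ===== VERDICT (by name: the statement is the Claim_ definition above) =====
set_option maxHeartbeats 4000000 in
theorem noise_timer_to_index_spec : Claim_equal_noise_timer_to_index := by
  intro t _
  unfold Spec_noise_timer_to_index
  rw [bEval]
  simp only [noise_timer_to_index, noisePeriodTable, PySem.List.enumerate_cons,
    PySem.List.enumerate_nil, PySem.List.pyGet?_zero_cons, Option.getD_some]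
  simp [bisectLeft]
  simp only [Int.abs_eq_natAbs]
  repeat' (first
    | omega
    | ((rw [ntiGo_no_improve]) <;> first | omega | (intro p hp; fin_cases hp <;> omega))
    | (rw [ntiGo.eq_2, if_pos (by omega)])
    | (rw [ntiGo.eq_2, if_neg (by omega)])
    | split)
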